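-- pv_equiv track=rewrite | github.com/larry-watkins-wps/hive | src/region_template/llm_cache.py | _last_index_for_role
-- ===== SOURCE A (Python) =====
-- from typing import Any, Literal
--
-- def _last_index_for_role(
--     messages: list[dict[str, Any]],
--     role: str,
-- ) -> int | None:
--     """Return the index of the last message with ``role``, or ``None``."""
--     for i in range(len(messages) - 1, -1, -1):
--         if messages[i].get("role") == role:
--             return i
--     return None
-- ===== SOURCE B (Python) =====
-- def _last_index_for_role(messages, role):
--     """Return the index of the last message with ``role``, or ``None``."""
--     last = None
--     for i, message in enumerate(messages):
--         if message.get("role") == role: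
--             last = i
--     return last
-- ===== Notes on version B (the rewrite author's own statement) =====
-- stated objective: idiomatic
-- what changed: Replaces the backward index loop with early return by a forward enumerate pass keeping a 'last seen' accumulator.
import Mathlib
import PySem

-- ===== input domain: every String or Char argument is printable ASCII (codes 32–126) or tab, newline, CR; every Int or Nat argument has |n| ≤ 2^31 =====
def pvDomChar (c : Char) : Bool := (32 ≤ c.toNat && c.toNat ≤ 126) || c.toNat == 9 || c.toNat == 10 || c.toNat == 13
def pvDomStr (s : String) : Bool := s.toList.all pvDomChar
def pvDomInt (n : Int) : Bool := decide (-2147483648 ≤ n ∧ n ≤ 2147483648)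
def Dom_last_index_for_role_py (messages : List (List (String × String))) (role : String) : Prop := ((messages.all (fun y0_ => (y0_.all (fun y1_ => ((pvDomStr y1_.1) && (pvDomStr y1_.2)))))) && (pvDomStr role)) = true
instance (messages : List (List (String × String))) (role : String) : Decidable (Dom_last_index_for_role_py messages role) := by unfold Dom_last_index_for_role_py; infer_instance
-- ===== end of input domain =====

-- B replaces A's backward index loop with early return by a forward enumerate pass
-- keeping a 'last seen' accumulator (objective: idiomatic; same O(n) cost).

-- shared helper: Python's dict.get("role") on an association list (first-match lookup)
def pvDictGet : List (String × String) → String → Option String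
  | [], _ => none
  | (k, v) :: rest, key => if k = key then some v else pvDictGet rest key

-- ===== PORT A =====
-- 'for i in range(len(messages)-1, -1, -1)': countdown over indices k-1, …, 0; the
-- loop index is always in range, so messages[i] is messages.getD i [].
def lastIdxGoA (messages : List (List (String × String))) (role : String) : Nat → Option Int
  | 0 => none
  | k + 1 =>
    if pvDictGet (messages.getD k []) "role" = some role then some (k : Int)
    else lastIdxGoA messages role k

def last_index_for_role_py (messages : List (List (String × String))) (role : String) : Option Int :=
  lastIdxGoA messages role messages.length

-- ===== PORT B =====
def last_index_for_role_py_alt (messages : List (List (String × String))) (role : String) : Option Int :=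
  (PySem.List.enumerate messages).foldl
    (fun last p => if pvDictGet p.2 "role" = some role then some p.1 else last) none

-- ===== PRECONDITION & SPEC =====
def Spec_last_index_for_role_py (messages : List (List (String × String))) (role : String) (out : Option Int) : Prop := out = last_index_for_role_py_alt messages role
instance (messages : List (List (String × String))) (role : String) (out : Option Int) : Decidable (Spec_last_index_for_role_py messages role out) := by unfold Spec_last_index_for_role_py; infer_instance

-- ===== CLAIM (what is proved, stated in full; the proofs are below) =====
def Claim_equal_last_index_for_role_py : Prop := ∀ (messages : List (List (String × String))) (role : String), Dom_last_index_for_role_py messages role → Spec_last_index_for_role_py messages role (last_index_for_role_py messages role)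

-- ===== LEMMAS AND PROOFS =====

-- appending one message does not change the countdown over the first l.length indices
theorem lastIdxGoA_append (l : List (List (String × String))) (m : List (String × String))
    (role : String) (k : Nat) (hk : k ≤ l.length) :
    lastIdxGoA (l ++ [m]) role k = lastIdxGoA l role k := by
  induction k with
  | zero => rfl
  | succ k ih =>
    have hlt : k < l.length := hk
    have hget : (l ++ [m]).getD k [] = l.getD k [] := by
      simp [List.getD, List.getElem?_append_left hlt]
    simp only [lastIdxGoA, hget, ih (Nat.le_of_lt hlt)]

theorem lastIdxGoA_eq_alt (l : List (List (String × String))) (role : String) :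
    lastIdxGoA l role l.length = last_index_for_role_py_alt l role := by
  induction l using List.reverseRecOn with
  | nil => rfl
  | append_singleton l m ih =>
    have hlen : (l ++ [m]).length = l.length + 1 := by simp
    have hget : (l ++ [m]).getD l.length [] = m := by
      simp [List.getD]
    rw [hlen]
    simp only [lastIdxGoA, hget, lastIdxGoA_append l m role l.length (le_refl _), ih]
    simp [last_index_for_role_py_alt, PySem.List.enumerate_append, List.foldl_append]

-- ===== VERDICT (by name: the statement is the Claim_ definition above) =====
theorem last_index_for_role_py_spec : Claim_equal_last_index_for_role_py := by
  intro messages role _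
  unfold Spec_last_index_for_role_py last_index_for_role_py
  exact lastIdxGoA_eq_alt messages role
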